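-- pv_equiv track=rewrite | github.com/ivchuruksaev/HEA-energy-adsorption | scripts/reproducibility_utils.py | parse_composition_elements
-- ===== SOURCE A (Python) =====
-- def parse_composition_elements(composition):
--     elements = []
--     current = ""
--
--     for char in str(composition):
--         if char.isupper() and current:
--             elements.append(current)
--             current = char
--         else:
--             current += char
--
--     if current:
--         elements.append(current)
--
--     return elements
-- ===== SOURCE B (Python) =====
-- def parse_composition_elements(composition):
--     s = str(composition)
--     tokens = []
--     i = 0
--     n = len(s)
--     while i < n:
--         j = i + 1
--         while j < n and not s[j].isupper():
--             j += 1
--         tokens.append(s[i:j])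
--         i = j
--     return tokens
-- ===== Notes on version B (the rewrite author's own statement) =====
-- stated objective: alternative
-- what changed: Replaces the character-accumulating state machine (growing a 'current' string, flushing it at each uppercase letter and at the end) with a token-span scanner: for each token start, scan forward to the next uppercase letter and emit the slice s[i:j] directly.
import Mathlib
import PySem

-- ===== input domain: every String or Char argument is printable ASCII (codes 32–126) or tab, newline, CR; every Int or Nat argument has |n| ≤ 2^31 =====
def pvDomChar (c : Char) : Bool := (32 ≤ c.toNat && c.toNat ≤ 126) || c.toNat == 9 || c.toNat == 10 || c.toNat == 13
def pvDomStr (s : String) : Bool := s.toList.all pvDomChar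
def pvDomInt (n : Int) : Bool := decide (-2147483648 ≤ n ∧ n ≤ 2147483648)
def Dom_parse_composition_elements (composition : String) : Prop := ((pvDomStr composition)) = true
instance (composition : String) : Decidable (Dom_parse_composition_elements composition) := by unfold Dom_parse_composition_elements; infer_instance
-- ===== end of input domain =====

-- B replaces A's character-accumulating state machine by a token-span scanner
-- (scan to the next uppercase letter, emit the slice); same cost, different decomposition.

-- ===== PORT A =====
-- state: (elements, current); 'current' kept as List Char, turned into a String when appended
def stepA (st : List String × List Char) (c : Char) : List String × List Char :=
  if PySem.Chars.isupper c && !st.2.isEmpty then (st.1 ++ [String.ofList st.2], [c])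
  else (st.1, st.2 ++ [c])

def finishA (st : List String × List Char) : List String :=
  if !st.2.isEmpty then st.1 ++ [String.ofList st.2] else st.1

def parse_composition_elements (composition : String) : List String :=
  finishA (composition.toList.foldl stepA ([], []))

-- ===== PORT B =====
-- 'not s[j].isupper()' of the inner scan loop
def pvNotUp (c : Char) : Bool := !PySem.Chars.isupper c

-- outer while-loop of Source B: one token per step; the inner loop's effect is
-- takeWhile/dropWhile over the characters after the token's first one
def goB : List Char → List String
  | [] => []
  | c :: rest =>
      String.ofList (c :: rest.takeWhile pvNotUp) :: goB (rest.dropWhile pvNotUp)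
termination_by cs => cs.length
decreasing_by
  exact Nat.lt_succ_of_le (List.length_dropWhile_le _ _)

def parse_composition_elements_alt (composition : String) : List String :=
  goB composition.toList

-- ===== PRECONDITION & SPEC =====
def Spec_parse_composition_elements (composition : String) (out : List String) : Prop := out = parse_composition_elements_alt composition
instance (composition : String) (out : List String) : Decidable (Spec_parse_composition_elements composition out) := by unfold Spec_parse_composition_elements; infer_instance

-- ===== CLAIM (what is proved, stated in full; the proofs are below) =====
def Claim_equal_parse_composition_elements : Prop := ∀ (composition : String), Dom_parse_composition_elements composition → Spec_parse_composition_elements composition (parse_composition_elements composition)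

-- ===== LEMMAS AND PROOFS =====
lemma goB_cons (c : Char) (rest : List Char) :
    goB (c :: rest) = String.ofList (c :: rest.takeWhile pvNotUp) :: goB (rest.dropWhile pvNotUp) := by
  rw [goB]

lemma foldA (cs : List Char) : ∀ (elems : List String) (cur : List Char), cur ≠ [] →
    finishA (cs.foldl stepA (elems, cur))
      = elems ++ String.ofList (cur ++ cs.takeWhile pvNotUp) :: goB (cs.dropWhile pvNotUp) := by
  induction cs with
  | nil =>
      intro elems cur hcur
      simp [finishA, goB, hcur]
  | cons c cs ih =>
      intro elems cur hcur
      by_cases h : PySem.Chars.isupper c = true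
      · have hstep : stepA (elems, cur) c = (elems ++ [String.ofList cur], [c]) := by
          simp [stepA, h, hcur]
        have hup : pvNotUp c = false := by simp [pvNotUp, h]
        rw [List.foldl_cons, hstep, ih _ [c] (by simp)]
        simp [hup, goB_cons]
      · have h' : PySem.Chars.isupper c = false := by simpa using h
        have hstep : stepA (elems, cur) c = (elems, cur ++ [c]) := by
          simp [stepA, h']
        have hup : pvNotUp c = true := by simp [pvNotUp, h']
        rw [List.foldl_cons, hstep, ih _ (cur ++ [c]) (by simp)]
        simp [hup]

-- ===== VERDICT (by name: the statement is the Claim_ definition above) =====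
theorem parse_composition_elements_spec : Claim_equal_parse_composition_elements := by
  intro composition _
  unfold Spec_parse_composition_elements parse_composition_elements parse_composition_elements_alt
  cases hcs : composition.toList with
  | nil => simp [finishA, goB]
  | cons c cs =>
      have hstep : stepA ([], []) c = ([], [c]) := by simp [stepA]
      rw [List.foldl_cons, hstep, foldA cs [] [c] (by simp)]
      rw [goB_cons]
      simp
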